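-- pv_equiv track=rewrite | github.com/Pyk017/TCS_Xplore_Proctered_Assesments | TCS_DCA_Practice/Question06.py | repetition
-- ===== SOURCE A (Python) =====
-- from collections import Counter
-- from math import factorial as fact
--
-- def repetition(string):
-- 	vowels, consont = 0, 0
-- 	for char in string:
-- 		if char in 'aeiouAEIOU':
-- 			vowels += 1
-- 		else:
-- 			consont += 1
--
-- 	repeat = list(filter(lambda x: x > 1, dict(Counter(string)).values()))
-- 	deno = 1
-- 	for num in repeat:
-- 		deno *= fact(num)
--
-- 	numerator = fact(vowels) * fact(consont)
--
-- 	return numerator // deno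
-- ===== SOURCE B (Python) =====
-- from collections import Counter
-- from math import comb
--
-- def repetition(string):
--     # Arrangements of the vowel multiset times arrangements of the consonant
--     # multiset, built incrementally from binomial coefficients: placing a block
--     # of n equal characters into a class that then holds t characters can be
--     # done in comb(t, n) ways.  No factorials and no division needed.
--     vt = ct = 0
--     result = 1
--     for ch, n in Counter(string).items():
--         if ch in 'aeiouAEIOU':
--             vt += n
--             result *= comb(vt, n)
--         else:
--             ct += n
--             result *= comb(ct, n)
--     return result
-- ===== Notes on version B (the rewrite author's own statement) =====
-- stated objective: alternative
-- what changed: B computes the answer as a product of binomial coefficients built incrementally (multiply by comb(running class total, count) for each distinct character), using the identity that the arrangements equal the product of the multinomials of the vowel and consonant multisets; it uses no factorials and no division, whereas A builds fact(vowels)*fact(consonants) and floor-divides by the product of factorials of repeated counts.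
import Mathlib
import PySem

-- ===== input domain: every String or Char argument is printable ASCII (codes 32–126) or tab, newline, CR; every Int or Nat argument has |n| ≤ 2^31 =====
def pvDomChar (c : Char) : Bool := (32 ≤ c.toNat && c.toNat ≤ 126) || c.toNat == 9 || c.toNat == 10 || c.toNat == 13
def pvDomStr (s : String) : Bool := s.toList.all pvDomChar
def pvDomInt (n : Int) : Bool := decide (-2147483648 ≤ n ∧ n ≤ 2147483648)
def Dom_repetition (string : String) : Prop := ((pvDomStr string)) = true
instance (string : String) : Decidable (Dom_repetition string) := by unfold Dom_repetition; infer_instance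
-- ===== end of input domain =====

-- B computes the answer as a product of binomial coefficients comb(running class
-- total, count) over the Counter's items — no factorials, no division; A builds
-- fact(vowels)*fact(consonants) and floor-divides by factorials of repeated counts.
-- Objective: alternative algorithm.

-- math.factorial (arguments here are always ≥ 0)
def pvFact (n : Int) : Int := (Nat.factorial n.toNat : Int)

-- math.comb (arguments here are always ≥ 0)
def pvComb (t n : Int) : Int := (Nat.choose t.toNat n.toNat : Int)

-- char in 'aeiouAEIOU'
def pvIsVowel (c : Char) : Bool := "aeiouAEIOU".toList.contains c

-- ===== PORT A =====
def repetition (string : String) : Int :=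
  let vc := string.toList.foldl
    (fun (p : Int × Int) c => if pvIsVowel c then (p.1 + 1, p.2) else (p.1, p.2 + 1)) (0, 0)
  let repeat_ := ((PySem.Dict.counter string.toList).values).filter (fun x => decide (x > 1))
  let deno := repeat_.foldl (fun d n => d * pvFact n) 1
  let numerator := pvFact vc.1 * pvFact vc.2
  PySem.Int.floordiv numerator deno

-- ===== PORT B =====
def repetition_alt (string : String) : Int :=
  let st := (PySem.Dict.counter string.toList).items.foldl
    (fun (p : Int × Int × Int) kn =>
      if pvIsVowel kn.1 then (p.1 + kn.2, p.2.1, p.2.2 * pvComb (p.1 + kn.2) kn.2)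
      else (p.1, p.2.1 + kn.2, p.2.2 * pvComb (p.2.1 + kn.2) kn.2)) (0, 0, 1)
  st.2.2

-- ===== PRECONDITION & SPEC =====
def Spec_repetition (string : String) (out : Int) : Prop := out = repetition_alt string
instance (string : String) (out : Int) : Decidable (Spec_repetition string out) := by unfold Spec_repetition; infer_instance

-- ===== CLAIM =====
def Claim_equal_repetition : Prop := ∀ (string : String), Dom_repetition string → Spec_repetition string (repetition string)

-- ===== LEMMAS AND PROOFS =====

-- vowel / consonant weighted sums over a list of (char, count) pairs
def pvSV (l : List (Char × Nat)) : Nat := ((l.filter (fun kn => pvIsVowel kn.1)).map Prod.snd).sum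
def pvSC (l : List (Char × Nat)) : Nat := ((l.filter (fun kn => ! pvIsVowel kn.1)).map Prod.snd).sum

-- A's character loop counts vowels and non-vowels
theorem pvA_loop (xs : List Char) (a b : Int) :
    xs.foldl (fun (p : Int × Int) c => if pvIsVowel c then (p.1 + 1, p.2) else (p.1, p.2 + 1)) (a, b)
      = (a + (xs.countP pvIsVowel : Int), b + (xs.countP (fun c => ! pvIsVowel c) : Int)) := by
  induction xs generalizing a b with
  | nil => simp
  | cons c t ih =>
    simp only [List.foldl_cons, List.countP_cons]
    by_cases h : pvIsVowel c = true <;> simp [h, ih] <;> ring_nf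

-- product form of A's denominator loop
theorem pvFold_prod (l : List Int) (a : Int) :
    l.foldl (fun d n => d * pvFact n) a = a * (l.map pvFact).prod := by
  induction l generalizing a with
  | nil => simp
  | cons n t ih => simp [ih]; ring

-- filtering out the 1-counts does not change the product of factorials
theorem pvProd_filter (l : List Int) (h : ∀ x ∈ l, 1 ≤ x) :
    ((l.filter (fun x => decide (x > 1))).map pvFact).prod = (l.map pvFact).prod := by
  induction l with
  | nil => simp
  | cons n t ih =>
    have hn : 1 ≤ n := h n (by simp)
    have ht := ih (fun x hx => h x (by simp [hx]))
    by_cases h1 : n > 1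
    · simp [h1, ht]
    · have : n = 1 := by omega
      subst this
      simp [ht, pvFact]

-- the PySem first-occurrence dedup is a permutation of Mathlib's dedup
theorem pvDedup_perm (xs : List Char) : List.Perm (PySem.List.dedup xs) xs.dedup := by
  apply (List.perm_ext_iff_of_nodup (PySem.List.nodup_dedup xs) xs.nodup_dedup).mpr
  intro x
  rw [PySem.List.mem_dedup, List.mem_dedup]

-- the count sum over dedup, restricted by a predicate, is a countP
theorem pvCountSum (p : Char → Bool) (xs : List Char) :
    (((PySem.List.dedup xs).filter p).map (fun k => xs.count k)).sum = xs.countP p := by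
  have hperm : List.Perm (((PySem.List.dedup xs).filter p).map (fun k => xs.count k))
      ((xs.dedup.filter p).map (fun k => xs.count k)) :=
    ((pvDedup_perm xs).filter p).map _
  rw [hperm.sum_eq]
  exact List.sum_map_count_dedup_filter_eq_countP p xs

theorem pvCount_pos (xs : List Char) (k : Char) (hk : k ∈ PySem.List.dedup xs) :
    (1 : Int) ≤ (xs.count k : Int) := by
  rw [PySem.List.mem_dedup] at hk
  have := List.count_pos_iff.mpr hk
  omega

-- B's loop invariant: the running product times the factorials of the processed
-- counts and of the starting totals equals the factorials of the final totals.
theorem pvB_key (l : List (Char × Nat)) (sv sc : Nat) (r : Int) :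
    (((l.map (fun kn => (kn.1, (kn.2 : Int)))).foldl
      (fun (p : Int × Int × Int) kn =>
        if pvIsVowel kn.1 then (p.1 + kn.2, p.2.1, p.2.2 * pvComb (p.1 + kn.2) kn.2)
        else (p.1, p.2.1 + kn.2, p.2.2 * pvComb (p.2.1 + kn.2) kn.2))
      ((sv : Int), (sc : Int), r)).2.2)
      * ((l.map (fun kn => (Nat.factorial kn.2 : Int))).prod)
      * (Nat.factorial sv : Int) * (Nat.factorial sc : Int)
      = r * (Nat.factorial (sv + pvSV l) : Int) * (Nat.factorial (sc + pvSC l) : Int) := by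
  induction l generalizing sv sc r with
  | nil => simp [pvSV, pvSC]
  | cons kn t ih =>
    obtain ⟨k, n⟩ := kn
    by_cases hv : pvIsVowel k = true
    · have hSVc : pvSV ((k, n) :: t) = n + pvSV t := by simp [pvSV, hv]
      have hSCc : pvSC ((k, n) :: t) = pvSC t := by simp [pvSC, hv]
      have hcast : ((sv : Int) + (n : Int)) = ((sv + n : Nat) : Int) := by push_cast; ring
      have hcomb : pvComb (((sv + n : Nat)) : Int) ((n : Nat) : Int) = (Nat.choose (sv + n) n : Int) := by
        simp only [pvComb, Int.toNat_natCast]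
      have hC : (Nat.choose (sv + n) n : Int) * (Nat.factorial n : Int) * (Nat.factorial sv : Int)
          = (Nat.factorial (sv + n) : Int) := by
        have := Nat.choose_mul_factorial_mul_factorial (Nat.le_add_left n sv)
        have h2 : sv + n - n = sv := by omega
        rw [h2] at this
        exact_mod_cast this
      have ihv := ih (sv + n) sc (r * (Nat.choose (sv + n) n : Int))
      simp only [List.map_cons, List.foldl_cons, hv, if_true, hcast, hcomb,
        List.prod_cons, hSVc, hSCc]
      rw [show sv + (n + pvSV t) = sv + n + pvSV t from by omega]
      have hF : (Nat.factorial (sv + n) : Int) ≠ 0 := by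
        exact_mod_cast Nat.factorial_ne_zero (sv + n)
      apply mul_right_cancel₀ hF
      linear_combination ((Nat.factorial n : Int) * (Nat.factorial sv : Int)) * ihv
        + (r * (Nat.factorial (sv + n + pvSV t) : Int) * (Nat.factorial (sc + pvSC t) : Int)) * hC
    · have hv' : pvIsVowel k = false := by simpa using hv
      have hSVc : pvSV ((k, n) :: t) = pvSV t := by simp [pvSV, hv']
      have hSCc : pvSC ((k, n) :: t) = n + pvSC t := by simp [pvSC, hv']
      have hcast : ((sc : Int) + (n : Int)) = ((sc + n : Nat) : Int) := by push_cast; ring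
      have hcomb : pvComb (((sc + n : Nat)) : Int) ((n : Nat) : Int) = (Nat.choose (sc + n) n : Int) := by
        simp only [pvComb, Int.toNat_natCast]
      have hC : (Nat.choose (sc + n) n : Int) * (Nat.factorial n : Int) * (Nat.factorial sc : Int)
          = (Nat.factorial (sc + n) : Int) := by
        have := Nat.choose_mul_factorial_mul_factorial (Nat.le_add_left n sc)
        have h2 : sc + n - n = sc := by omega
        rw [h2] at this
        exact_mod_cast this
      have ihc := ih sv (sc + n) (r * (Nat.choose (sc + n) n : Int))
      simp only [List.map_cons, List.foldl_cons, hv', Bool.false_eq_true, if_false, hcast, hcomb,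
        List.prod_cons, hSVc, hSCc]
      rw [show sc + (n + pvSC t) = sc + n + pvSC t from by omega]
      have hF : (Nat.factorial (sc + n) : Int) ≠ 0 := by
        exact_mod_cast Nat.factorial_ne_zero (sc + n)
      apply mul_right_cancel₀ hF
      linear_combination ((Nat.factorial n : Int) * (Nat.factorial sc : Int)) * ihc
        + (r * (Nat.factorial (sv + pvSV t) : Int) * (Nat.factorial (sc + n + pvSC t) : Int)) * hC

-- ===== VERDICT =====
theorem repetition_spec : Claim_equal_repetition := by
  intro s _
  unfold Spec_repetition repetition repetition_alt
  simp only [PySem.Dict.items_counter, PySem.Dict.values, ← PySem.List.dedup_eq_ofList]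
  set xs := s.toList with hxs
  set dd := PySem.List.dedup xs with hdd
  -- A's side
  rw [pvA_loop, pvFold_prod]
  simp only [List.map_map, Function.comp_def]
  rw [pvProd_filter _ (by
    intro x hx
    simp only [List.mem_map] at hx
    obtain ⟨k, hk, rfl⟩ := hx
    exact pvCount_pos xs k hk)]
  simp only [List.map_map, Function.comp_def, one_mul]
  -- B's side via the invariant on l0
  set l0 : List (Char × Nat) := dd.map (fun k => (k, xs.count k)) with hl0
  have hitems : dd.map (fun k => (k, (xs.count k : Int)))
      = l0.map (fun kn => (kn.1, (kn.2 : Int))) := by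
    simp [hl0, List.map_map, Function.comp_def]
  have hkey := pvB_key l0 0 0 1
  have hSV : pvSV l0 = xs.countP pvIsVowel := by
    simp only [pvSV, hl0, List.filter_map, List.map_map, Function.comp_def]
    exact pvCountSum pvIsVowel xs
  have hSC : pvSC l0 = xs.countP (fun c => ! pvIsVowel c) := by
    simp only [pvSC, hl0, List.filter_map, List.map_map, Function.comp_def]
    exact pvCountSum (fun c => ! pvIsVowel c) xs
  have hD : (l0.map (fun kn => (Nat.factorial kn.2 : Int))).prod
      = (dd.map (fun k => pvFact (xs.count k : Int))).prod := by
    simp [hl0, List.map_map, Function.comp_def, pvFact]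
  rw [hSV, hSC, hD] at hkey
  simp only [Nat.factorial_zero, Nat.cast_one, Nat.cast_zero, mul_one, one_mul, zero_add] at hkey
  rw [hitems]
  -- positivity of the denominator
  have hDpos : 0 < (dd.map (fun k => pvFact (xs.count k : Int))).prod := by
    apply List.prod_pos
    intro x hx
    simp only [List.mem_map] at hx
    obtain ⟨k, hk, rfl⟩ := hx
    simp only [pvFact]
    exact_mod_cast Nat.factorial_pos _
  rw [PySem.Int.floordiv_eq_ediv_of_pos hDpos]
  have hnum : pvFact (0 + (xs.countP pvIsVowel : Int)) * pvFact (0 + (xs.countP (fun c => ! pvIsVowel c) : Int))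
      = (Nat.factorial (xs.countP pvIsVowel) : Int) * (Nat.factorial (xs.countP (fun c => ! pvIsVowel c)) : Int) := by
    simp [pvFact]
  rw [hnum, ← hkey]
  exact Int.mul_ediv_cancel _ (by omega)
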